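-- pv_equiv track=rewrite | github.com/germanpadua/Pocha-App | main_app.py | generar_nombres_rondas
-- ===== SOURCE A (Python) =====
-- def generar_nombres_rondas(num_jugadores, rondas_por_jugador):
--     nombres_rondas = []
--     contador_rondas = 1
--
--     # Fase ascendente
--     for i in range(1, rondas_por_jugador):
--         nombres_rondas.append(f"{contador_rondas}. {i} cartas")
--         contador_rondas += 1
--
--     # Fase con el número máximo de cartas
--     for i in range(num_jugadores):
--         nombres_rondas.append(f"{contador_rondas}. {rondas_por_jugador} cartas")
--         contador_rondas += 1
--
--     # Fase descendente
--     for i in range(rondas_por_jugador - 1, 0, -1):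
--         nombres_rondas.append(f"{contador_rondas}. {i} cartas")
--         contador_rondas += 1
--
--     for i in range(num_jugadores):
--         nombres_rondas.append(f"{contador_rondas}. {rondas_por_jugador} cartas")
--         contador_rondas += 1
--
--     return nombres_rondas
-- ===== SOURCE B (Python) =====
-- def generar_nombres_rondas(num_jugadores, rondas_por_jugador):
--     # Closed-form: the card count of round idx is a piecewise function of its
--     # position, so one loop over the positions suffices (no counter, no staging).
--     a = max(rondas_por_jugador - 1, 0)   # length of each ramp phase
--     m = max(num_jugadores, 0)            # length of each plateau phase
--
--     def cartas(idx):
--         if idx <= a: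
--             return idx                       # ascending ramp
--         if idx <= a + m:
--             return rondas_por_jugador        # first plateau
--         if idx <= 2 * a + m:
--             return 2 * a + m + 1 - idx       # descending ramp
--         return rondas_por_jugador            # second plateau
--
--     return [f"{i}. {cartas(i)} cartas" for i in range(1, 2 * a + 2 * m + 1)]
-- ===== Notes on version B (the rewrite author's own statement) =====
-- stated objective: alternative
-- what changed: B replaces A's four staged append-loops with a threaded counter by a closed-form piecewise function mapping each round position to its card count, and generates the whole list in one loop over positions 1..2*(r-1)+2*n.
import Mathlib
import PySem

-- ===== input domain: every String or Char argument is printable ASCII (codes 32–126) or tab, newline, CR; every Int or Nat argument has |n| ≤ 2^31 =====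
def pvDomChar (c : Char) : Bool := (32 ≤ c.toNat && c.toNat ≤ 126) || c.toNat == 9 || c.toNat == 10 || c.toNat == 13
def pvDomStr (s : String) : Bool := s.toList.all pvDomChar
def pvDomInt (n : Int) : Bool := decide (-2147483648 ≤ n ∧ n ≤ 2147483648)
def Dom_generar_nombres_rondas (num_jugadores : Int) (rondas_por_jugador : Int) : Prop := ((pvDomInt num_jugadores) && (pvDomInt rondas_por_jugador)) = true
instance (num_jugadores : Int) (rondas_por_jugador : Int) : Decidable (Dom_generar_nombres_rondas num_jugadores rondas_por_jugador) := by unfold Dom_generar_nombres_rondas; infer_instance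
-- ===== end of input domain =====

-- B computes each round's card count by a closed-form piecewise function of its
-- position and emits the list in one loop, instead of A's four staged append
-- loops threading a counter (objective: alternative).

-- ===== PORT A =====
def generar_nombres_rondas (num_jugadores : Int) (rondas_por_jugador : Int) : List String :=
  let s1 := (PySem.List.pyRange 1 rondas_por_jugador 1).foldl
    (fun (acc : List String × Int) i =>
      (acc.1 ++ [PySem.Int.toStr acc.2 ++ ". " ++ PySem.Int.toStr i ++ " cartas"], acc.2 + 1))
    ([], 1)
  let s2 := (PySem.List.pyRange 0 num_jugadores 1).foldl
    (fun (acc : List String × Int) _ =>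
      (acc.1 ++ [PySem.Int.toStr acc.2 ++ ". " ++ PySem.Int.toStr rondas_por_jugador ++ " cartas"], acc.2 + 1))
    s1
  let s3 := (PySem.List.pyRange (rondas_por_jugador - 1) 0 (-1)).foldl
    (fun (acc : List String × Int) i =>
      (acc.1 ++ [PySem.Int.toStr acc.2 ++ ". " ++ PySem.Int.toStr i ++ " cartas"], acc.2 + 1))
    s2
  let s4 := (PySem.List.pyRange 0 num_jugadores 1).foldl
    (fun (acc : List String × Int) _ =>
      (acc.1 ++ [PySem.Int.toStr acc.2 ++ ". " ++ PySem.Int.toStr rondas_por_jugador ++ " cartas"], acc.2 + 1))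
    s3
  s4.1

-- ===== PORT B =====
-- card count of round idx, a closed-form piecewise function of the position
def pvCartas (num_jugadores : Int) (rondas_por_jugador : Int) (idx : Int) : Int :=
  let a := max (rondas_por_jugador - 1) 0
  let m := max num_jugadores 0
  if idx ≤ a then idx
  else if idx ≤ a + m then rondas_por_jugador
  else if idx ≤ 2 * a + m then 2 * a + m + 1 - idx
  else rondas_por_jugador

def generar_nombres_rondas_alt (num_jugadores : Int) (rondas_por_jugador : Int) : List String :=
  let a := max (rondas_por_jugador - 1) 0
  let m := max num_jugadores 0
  (PySem.List.pyRange 1 (2 * a + 2 * m + 1) 1).map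
    (fun i => PySem.Int.toStr i ++ ". "
      ++ PySem.Int.toStr (pvCartas num_jugadores rondas_por_jugador i) ++ " cartas")

-- ===== PRECONDITION & SPEC =====
def Spec_generar_nombres_rondas (num_jugadores : Int) (rondas_por_jugador : Int) (out : List String) : Prop := out = generar_nombres_rondas_alt num_jugadores rondas_por_jugador
instance (num_jugadores : Int) (rondas_por_jugador : Int) (out : List String) : Decidable (Spec_generar_nombres_rondas num_jugadores rondas_por_jugador out) := by unfold Spec_generar_nombres_rondas; infer_instance

-- ===== CLAIM (what is proved, stated in full; the proofs are below) =====
def Claim_equal_generar_nombres_rondas : Prop := ∀ (num_jugadores : Int) (rondas_por_jugador : Int), Dom_generar_nombres_rondas num_jugadores rondas_por_jugador → Spec_generar_nombres_rondas num_jugadores rondas_por_jugador (generar_nombres_rondas num_jugadores rondas_por_jugador)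

-- ===== LEMMAS AND PROOFS =====

/-- A's generic append loop: numbering by a threaded counter equals enumerating. -/
lemma pv_foldl_label (lbl : Int → Int → String) (xs : List Int) (out : List String) (k : Int) :
    xs.foldl (fun (acc : List String × Int) i => (acc.1 ++ [lbl acc.2 i], acc.2 + 1)) (out, k)
      = (out ++ (PySem.List.enumerate xs k).map (fun p => lbl p.1 p.2), k + xs.length) := by
  induction xs generalizing out k with
  | nil => simp [PySem.List.enumerate_nil]
  | cons x xs ih =>
      simp only [List.foldl_cons, ih, PySem.List.enumerate_cons, List.map_cons, List.length_cons]
      rw [Prod.mk.injEq]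
      exact ⟨by simp, by push_cast; ring⟩

/-- A constant-body counting loop over range(n) is the labelled loop over n copies of r. -/
lemma pv_const_loop (lbl : Int → Int → String) (n r : Int) (s : List String × Int) :
    (PySem.List.pyRange 0 n 1).foldl
        (fun (acc : List String × Int) _ => (acc.1 ++ [lbl acc.2 r], acc.2 + 1)) s
      = (List.replicate n.toNat r).foldl
        (fun (acc : List String × Int) i => (acc.1 ++ [lbl acc.2 i], acc.2 + 1)) s := by
  have h : List.replicate n.toNat r = (PySem.List.pyRange 0 n 1).map (fun _ => r) := by
    rw [List.map_const', PySem.List.length_pyRange_one]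
    simp
  rw [h, List.foldl_map]

/-- Enumerating an ascending unit range starting at its own first element pairs each i with i. -/
lemma pv_enum_range (s t : Int) :
    PySem.List.enumerate (PySem.List.pyRange s t 1) s
      = (PySem.List.pyRange s t 1).map (fun i => (i, i)) := by
  by_cases h : t ≤ s
  · rw [PySem.List.pyRange_one_eq_nil h]; rfl
  · push_neg at h
    have hlen : ((t - s).toNat) = (t - (s+1)).toNat + 1 := by omega
    rw [PySem.List.pyRange_one_cons h, PySem.List.enumerate_cons, List.map_cons,
      pv_enum_range (s+1) t]
termination_by (t - s).toNat
decreasing_by omega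

/-- Enumerating k copies of r starting at s pairs each position with r. -/
lemma pv_enum_replicate (k : Nat) (r s : Int) :
    PySem.List.enumerate (List.replicate k r) s
      = (PySem.List.pyRange s (s + k) 1).map (fun i => (i, r)) := by
  induction k generalizing s with
  | zero => simp [PySem.List.enumerate_nil, PySem.List.pyRange_one_eq_nil]
  | succ k ih =>
      have h : s < s + (k + 1 : Nat) := by push_cast; omega
      rw [List.replicate_succ, PySem.List.enumerate_cons, PySem.List.pyRange_one_cons h,
        List.map_cons, ih (s+1)]
      congr 2
      push_cast; ring_nf

/-- Enumerating a countdown v,v-1,…,1 starting at s pairs position i with s+v-i. -/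
lemma pv_enum_countdown (v s : Int) :
    PySem.List.enumerate (PySem.List.pyRange v 0 (-1)) s
      = (PySem.List.pyRange s (s + v) 1).map (fun i => (i, s + v - i)) := by
  by_cases h : v ≤ 0
  · rw [PySem.List.pyRange_neg_one_eq_nil h, PySem.List.pyRange_one_eq_nil (by omega)]; rfl
  · push_neg at h
    have h2 : s < s + v := by omega
    rw [PySem.List.pyRange_neg_one_cons h, PySem.List.enumerate_cons,
      PySem.List.pyRange_one_cons h2, List.map_cons, pv_enum_countdown (v-1) (s+1)]
    have hsv : s + 1 + (v - 1) = s + v := by ring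
    rw [hsv]
    have hv : s + v - s = v := by ring
    rw [hv]
termination_by v.toNat
decreasing_by omega

-- ===== VERDICT (by name: the statement is the Claim_ definition above) =====
theorem generar_nombres_rondas_spec : Claim_equal_generar_nombres_rondas := by
  intro n r _
  unfold Spec_generar_nombres_rondas generar_nombres_rondas generar_nombres_rondas_alt
  simp only [pv_const_loop (fun k i => PySem.Int.toStr k ++ ". " ++ PySem.Int.toStr i ++ " cartas") n r,
    pv_foldl_label (fun k i => PySem.Int.toStr k ++ ". " ++ PySem.Int.toStr i ++ " cartas")]
  set a := max (r - 1) 0 with ha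
  set m := max n 0 with hm
  have L1 : ((PySem.List.pyRange 1 r 1).length : Int) = a := by
    rw [PySem.List.length_pyRange_one]; omega
  have L2 : ((List.replicate n.toNat r).length : Int) = m := by
    rw [List.length_replicate]; omega
  have L3 : ((PySem.List.pyRange (r - 1) 0 (-1)).length : Int) = a := by
    rw [PySem.List.length_pyRange_neg_one]; omega
  rw [L1, L2, L3]
  -- the four enumerate segments, each as a map over its own position range
  have e1 : PySem.List.enumerate (PySem.List.pyRange 1 r 1) 1
      = (PySem.List.pyRange 1 (1 + a) 1).map (fun i => (i, i)) := by
    rw [pv_enum_range 1 r]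
    by_cases h : r ≤ 1
    · rw [PySem.List.pyRange_one_eq_nil h, PySem.List.pyRange_one_eq_nil (by omega)]
    · have hr : 1 + a = r := by omega
      rw [hr]
  have e2 : PySem.List.enumerate (List.replicate n.toNat r) (1 + a)
      = (PySem.List.pyRange (1 + a) (1 + a + m) 1).map (fun i => (i, r)) := by
    rw [pv_enum_replicate n.toNat r (1 + a), show ((n.toNat : Int)) = m from by omega]
  have e3 : PySem.List.enumerate (PySem.List.pyRange (r - 1) 0 (-1)) (1 + a + m)
      = (PySem.List.pyRange (1 + a + m) (1 + 2 * a + m) 1).map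
          (fun i => (i, 1 + a + m + (r - 1) - i)) := by
    rw [pv_enum_countdown (r - 1) (1 + a + m)]
    by_cases h : r ≤ 1
    · rw [PySem.List.pyRange_one_eq_nil (by omega), PySem.List.pyRange_one_eq_nil (by omega)]
    · have hr : 1 + a + m + (r - 1) = 1 + 2 * a + m := by omega
      rw [hr]
  have e4 : PySem.List.enumerate (List.replicate n.toNat r) (1 + a + m + a)
      = (PySem.List.pyRange (1 + 2 * a + m) (1 + 2 * a + 2 * m) 1).map (fun i => (i, r)) := by
    rw [pv_enum_replicate n.toNat r (1 + a + m + a), show ((n.toNat : Int)) = m from by omega,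
      show (1 : Int) + a + m + a = 1 + 2 * a + m from by ring,
      show (1 : Int) + 2 * a + m + m = 1 + 2 * a + 2 * m from by ring]
  -- B's single position range splits into the four segments
  have split :
      PySem.List.pyRange 1 (2 * a + 2 * m + 1) 1
        = PySem.List.pyRange 1 (1 + a) 1
          ++ PySem.List.pyRange (1 + a) (1 + a + m) 1
          ++ PySem.List.pyRange (1 + a + m) (1 + 2 * a + m) 1
          ++ PySem.List.pyRange (1 + 2 * a + m) (1 + 2 * a + 2 * m) 1 := by
    rw [show (2 * a + 2 * m + 1) = (1 + 2 * a + 2 * m) from by ring,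
      PySem.List.pyRange_one_append 1 (1 + a) (1 + 2 * a + 2 * m) (by omega) (by omega),
      PySem.List.pyRange_one_append (1 + a) (1 + a + m) (1 + 2 * a + 2 * m) (by omega) (by omega),
      PySem.List.pyRange_one_append (1 + a + m) (1 + 2 * a + m) (1 + 2 * a + 2 * m) (by omega) (by omega)]
    simp only [List.append_assoc]
  rw [e1, e2, e3, e4, split]
  simp only [List.map_append, List.map_map, List.nil_append]
  congr 1
  congr 1
  congr 1
  · apply List.map_congr_left
    intro x hx
    rw [PySem.List.mem_pyRange_one] at hx
    simp only [Function.comp, pvCartas]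
    rw [if_pos (by omega)]
  · apply List.map_congr_left
    intro x hx
    rw [PySem.List.mem_pyRange_one] at hx
    simp only [Function.comp, pvCartas]
    rw [if_neg (by omega), if_pos (by omega)]
  · apply List.map_congr_left
    intro x hx
    rw [PySem.List.mem_pyRange_one] at hx
    simp only [Function.comp, pvCartas]
    rw [if_neg (by omega), if_neg (by omega), if_pos (by omega),
      show 1 + a + m + (r - 1) - x = 2 * a + m + 1 - x from by omega]
  · apply List.map_congr_left
    intro x hx
    rw [PySem.List.mem_pyRange_one] at hx
    simp only [Function.comp, pvCartas]
    rw [if_neg (by omega), if_neg (by omega), if_neg (by omega)]
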